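-- pv_equiv track=rewrite | github.com/aopolin-lv/RoboMP2 | data_process/utils.py | handle_twist
-- ===== SOURCE A (Python) =====
-- from typing import List, Callable, Dict
--
-- def is_assignment(code: str) -> bool:
--     if not code or " = " not in code:
--         return False
--     parts = code.split("= ", 1)
--     if len(parts) < 2:
--         return False
--     value = parts[1].strip()
--     return (value.startswith('"') and value.endswith('"')) or (value.startswith("'") and value.endswith("'"))
--
-- def handle_twist(codes: List[str]) -> List[str]:
--     return_code = []
--     for code in codes:
--         if is_assignment(code) or any(keyword in code for keyword in ["GetObsImage", "GetPromptImages", "GetObjectsWtihGivenTexture", "RecDegree", "RotateAll"]):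
--             return_code.append(code)
--         elif "return info" in code:
--             break
--     return return_code
-- ===== SOURCE B (Python) =====
-- from typing import List
--
-- KEYWORDS = ["GetObsImage", "GetPromptImages", "GetObjectsWtihGivenTexture", "RecDegree", "RotateAll"]
--
-- def is_assignment(code: str) -> bool:
--     if not code or " = " not in code:
--         return False
--     parts = code.split("= ", 1)
--     if len(parts) < 2:
--         return False
--     value = parts[1].strip()
--     return (value.startswith('"') and value.endswith('"')) or (value.startswith("'") and value.endswith("'"))
--
-- def _keep(code: str) -> bool:
--     return is_assignment(code) or any(k in code for k in KEYWORDS)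
--
-- def handle_twist(codes: List[str]) -> List[str]:
--     cut = next((i for i, c in enumerate(codes) if not _keep(c) and "return info" in c), len(codes))
--     return [c for c in codes[:cut] if _keep(c)]
-- ===== Notes on version B (the rewrite author's own statement) =====
-- stated objective: alternative
-- what changed: Replaces the single loop with a conditional break by two separate passes: first find the cutoff index (first non-kept line containing 'return info'), then filter the kept lines from the prefix before it.
import Mathlib
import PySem

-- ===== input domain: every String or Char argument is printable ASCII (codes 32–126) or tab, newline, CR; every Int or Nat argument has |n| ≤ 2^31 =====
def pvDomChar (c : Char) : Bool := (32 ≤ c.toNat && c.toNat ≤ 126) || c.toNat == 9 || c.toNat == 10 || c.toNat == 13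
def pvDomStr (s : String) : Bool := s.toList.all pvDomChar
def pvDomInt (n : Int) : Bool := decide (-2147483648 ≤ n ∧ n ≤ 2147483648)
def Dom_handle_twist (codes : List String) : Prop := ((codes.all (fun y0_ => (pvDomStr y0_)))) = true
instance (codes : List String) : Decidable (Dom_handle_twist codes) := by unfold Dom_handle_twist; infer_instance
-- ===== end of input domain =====

-- B is an alternative decomposition: find the cutoff index first, then filter the prefix.

-- ===== PORT A =====
def pvKeywords : List String := ["GetObsImage", "GetPromptImages", "GetObjectsWtihGivenTexture", "RecDegree", "RotateAll"]

def is_assignment (code : String) : Bool :=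
  if code = "" || !(PySem.Str.isIn " = " code) then false
  else
    match PySem.Str.splitMax? code "= " 1 with
    | none => false
    | some parts =>
      if parts.length < 2 then false
      else
        match PySem.List.pyGet? parts 1 with
        | none => false
        | some p =>
          let value := PySem.Str.strip p
          (PySem.Str.startswith value "\"" && PySem.Str.endswith value "\"") ||
          (PySem.Str.startswith value "'" && PySem.Str.endswith value "'")

def handle_twist_go (acc : List String) : List String → List String
  | [] => acc
  | c :: rest =>
    if is_assignment c || pvKeywords.any (fun k => PySem.Str.isIn k c) then
      handle_twist_go (acc ++ [c]) rest
    else if PySem.Str.isIn "return info" c then acc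
    else handle_twist_go acc rest

def handle_twist (codes : List String) : List String :=
  handle_twist_go [] codes

-- ===== PORT B =====
def pvKeep (code : String) : Bool :=
  is_assignment code || pvKeywords.any (fun k => PySem.Str.isIn k code)

def handle_twist_alt (codes : List String) : List String :=
  let cut := codes.findIdx (fun c => !pvKeep c && PySem.Str.isIn "return info" c)
  (codes.take cut).filter pvKeep

-- ===== PRECONDITION & SPEC =====
def Spec_handle_twist (codes : List String) (out : List String) : Prop := out = handle_twist_alt codes
instance (codes : List String) (out : List String) : Decidable (Spec_handle_twist codes out) := by unfold Spec_handle_twist; infer_instance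

-- ===== CLAIM (what is proved, stated in full; the proofs are below) =====
def Claim_equal_handle_twist : Prop := ∀ (codes : List String), Dom_handle_twist codes → Spec_handle_twist codes (handle_twist codes)

-- ===== LEMMAS AND PROOFS =====
theorem handle_twist_go_append (acc : List String) (l : List String) :
    handle_twist_go acc l = acc ++ handle_twist_go [] l := by
  induction l generalizing acc with
  | nil => simp [handle_twist_go]
  | cons c rest ih =>
    simp only [handle_twist_go]
    split_ifs with h1 h2
    · rw [ih (acc ++ [c]), ih ([] ++ [c])]; simp
    · simp
    · exact ih acc

theorem handle_twist_eq_alt (codes : List String) :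
    handle_twist codes = handle_twist_alt codes := by
  induction codes with
  | nil => simp [handle_twist, handle_twist_go, handle_twist_alt]
  | cons c rest ih =>
    simp only [handle_twist, handle_twist_go, handle_twist_alt, List.findIdx_cons] at *
    rw [show (is_assignment c || pvKeywords.any fun k => PySem.Str.isIn k c) = pvKeep c from rfl]
    by_cases hk : pvKeep c = true
    · rw [if_pos hk, handle_twist_go_append ([] ++ [c])]
      simp [hk, List.take_succ_cons, List.filter_cons, ih]
    · rw [if_neg hk]
      simp only [Bool.not_eq_true] at hk
      by_cases hr : PySem.Str.isIn "return info" c = true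
      all_goals simp only [Bool.not_eq_true, PySem.Str.isIn_eq,
        show ("return info".toList) = ['r','e','t','u','r','n',' ','i','n','f','o'] from rfl] at hr
      · simp [hr, hk]
      · simp [hr, hk, List.take_succ_cons, List.filter_cons, ih]

-- ===== VERDICT (by name: the statement is the Claim_ definition above) =====
theorem handle_twist_spec : Claim_equal_handle_twist := by
  intro codes _
  unfold Spec_handle_twist
  exact handle_twist_eq_alt codes
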